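-- pv_equiv track=rewrite | github.com/jakerslam/PQTS | tools/check_roadmap_governance.py | _parity_p0_state
-- ===== SOURCE A (Python) =====
-- def _parity_p0_state(todo_text: str) -> tuple[bool, bool]:
--     """Return (found, complete) for the Parity P0 subsection in TODO."""
--     in_p0 = False
--     found = False
--     has_open = False
--     for line in todo_text.splitlines():
--         stripped = line.strip()
--         if stripped.startswith("### "):
--             if in_p0:
--                 break
--             if stripped.lower().startswith("### p0 "):
--                 in_p0 = True
--                 found = True
--             continue
--         if not in_p0:
--             continue
--         if stripped.startswith("- [ ]"):
--             has_open = True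
--     return found, not has_open
-- ===== SOURCE B (Python) =====
-- def _parity_p0_state(todo_text: str) -> tuple[bool, bool]:
--     """Return (found, complete) for the Parity P0 subsection in TODO."""
--     # Group the text into header-delimited sections: (stripped header, stripped body lines).
--     sections = []
--     current = None
--     for line in todo_text.splitlines():
--         s = line.strip()
--         if s.startswith("### "):
--             current = (s, [])
--             sections.append(current)
--         elif current is not None:
--             current[1].append(s)
--     for header, body in sections:
--         if header.lower().startswith("### p0 "):
--             return True, not any(b.startswith("- [ ]") for b in body)
--     return False, True
-- ===== Notes on version B (the rewrite author's own statement) =====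
-- stated objective: simpler
-- what changed: Replaces A's single flag-carrying loop (in_p0/found/has_open with a break) by a two-phase decomposition: first group the lines into header-delimited sections, then pick the first '### p0 ' section and test its body for open items.
import Mathlib
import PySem

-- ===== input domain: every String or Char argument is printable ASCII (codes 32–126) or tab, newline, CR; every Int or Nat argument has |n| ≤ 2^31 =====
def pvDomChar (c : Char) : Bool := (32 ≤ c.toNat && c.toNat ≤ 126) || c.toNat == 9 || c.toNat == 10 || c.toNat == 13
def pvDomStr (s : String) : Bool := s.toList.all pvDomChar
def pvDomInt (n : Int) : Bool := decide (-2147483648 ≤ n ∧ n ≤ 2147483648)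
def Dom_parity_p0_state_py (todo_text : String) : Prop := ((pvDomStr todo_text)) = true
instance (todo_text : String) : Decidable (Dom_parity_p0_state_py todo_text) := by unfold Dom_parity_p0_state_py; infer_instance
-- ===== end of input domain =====

-- B replaces A's single flag-carrying loop by a two-phase decomposition (group lines into
-- header-delimited sections, then inspect the first "### p0 " section); objective: simpler.

-- ===== PORT A =====
-- state: (in_p0, found, has_open); hitting a header while in_p0 is Python's `break`
def pvA_loop : List String → Bool → Bool → Bool → Bool × Bool
  | [], _, found, has_open => (found, !has_open)
  | line :: rest, in_p0, found, has_open =>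
    let stripped := PySem.Str.strip line
    if PySem.Str.startswith stripped "### " then
      if in_p0 then (found, !has_open)
      else if PySem.Str.startswith (PySem.Str.lower stripped) "### p0 " then
        pvA_loop rest true true has_open
      else
        pvA_loop rest in_p0 found has_open
    else if !in_p0 then
      pvA_loop rest in_p0 found has_open
    else if PySem.Str.startswith stripped "- [ ]" then
      pvA_loop rest in_p0 found true
    else
      pvA_loop rest in_p0 found has_open

def parity_p0_state_py (todo_text : String) : Bool × Bool :=
  pvA_loop (PySem.Str.splitlines todo_text) false false false

-- ===== PORT B =====
-- stripped body lines of a section (until the next header), plus the remaining lines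
def pvB_body : List String → List String × List String
  | [] => ([], [])
  | l :: rest =>
    let s := PySem.Str.strip l
    if PySem.Str.startswith s "### " then ([], l :: rest)
    else
      let (b, r) := pvB_body rest
      (s :: b, r)

theorem pvB_body_len : ∀ ls : List String, (pvB_body ls).2.length ≤ ls.length := by
  intro ls
  induction ls with
  | nil => simp [pvB_body]
  | cons l rest ih =>
      simp only [pvB_body]
      split
      · simp
      · simpa using Nat.le_succ_of_le ih

-- header-delimited sections: (stripped header, stripped body lines)
def pvB_sections : List String → List (String × List String)
  | [] => []
  | l :: rest =>
    let s := PySem.Str.strip l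
    if PySem.Str.startswith s "### " then
      let p := pvB_body rest
      (s, p.1) :: pvB_sections p.2
    else
      pvB_sections rest
  termination_by ls => ls.length
  decreasing_by
    · exact Nat.lt_succ_of_le (pvB_body_len rest)
    · simp

def parity_p0_state_py_alt (todo_text : String) : Bool × Bool :=
  match (pvB_sections (PySem.Str.splitlines todo_text)).find?
      (fun sec => PySem.Str.startswith (PySem.Str.lower sec.1) "### p0 ") with
  | some sec => (true, !(sec.2.any (fun b => PySem.Str.startswith b "- [ ]")))
  | none => (false, true)

-- ===== PRECONDITION & SPEC =====
def Spec_parity_p0_state_py (todo_text : String) (out : Bool × Bool) : Prop := out = parity_p0_state_py_alt todo_text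
instance (todo_text : String) (out : Bool × Bool) : Decidable (Spec_parity_p0_state_py todo_text out) := by unfold Spec_parity_p0_state_py; infer_instance

-- ===== CLAIM (what is proved, stated in full; the proofs are below) =====
def Claim_equal_parity_p0_state_py : Prop := ∀ (todo_text : String), Dom_parity_p0_state_py todo_text → Spec_parity_p0_state_py todo_text (parity_p0_state_py todo_text)

-- ===== LEMMAS AND PROOFS =====

-- once A is inside the P0 section, it computes exactly the open-item scan of the section body
theorem pvA_in_body : ∀ (ls : List String) (h : Bool),
    pvA_loop ls true true h
      = (true, !(h || (pvB_body ls).1.any (fun b => PySem.Str.startswith b "- [ ]"))) := by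
  intro ls
  induction ls with
  | nil => intro h; simp [pvA_loop, pvB_body]
  | cons l rest ih =>
      intro h
      simp only [pvA_loop, pvB_body]
      split
      · simp
      · by_cases hop : PySem.Chars.startswith (PySem.Chars.strip l.toList) ['-', ' ', '[', ' ', ']'] = true
        · simp [ih, hop]
        · simp [ih, hop]

-- while not yet inside P0, A skips non-header lines exactly up to the next header
theorem pvA_skip_body : ∀ ls : List String,
    pvA_loop ls false false false = pvA_loop (pvB_body ls).2 false false false := by
  intro ls
  induction ls with
  | nil => simp [pvB_body]
  | cons l rest ih =>
      simp only [pvB_body]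
      split
      · rfl
      · rename_i hnh
        simp only [pvA_loop, hnh]
        simpa using ih

theorem pvA_eq_sections : ∀ ls : List String,
    pvA_loop ls false false false
      = (match (pvB_sections ls).find?
            (fun sec => PySem.Str.startswith (PySem.Str.lower sec.1) "### p0 ") with
         | some sec => (true, !(sec.2.any (fun b => PySem.Str.startswith b "- [ ]")))
         | none => (false, true)) := by
  intro ls
  induction hn : ls.length using Nat.strong_induction_on generalizing ls with
  | _ n ih =>
    match ls with
    | [] => simp [pvA_loop, pvB_sections]
    | l :: rest =>
      simp only [pvA_loop, pvB_sections]
      by_cases hh : PySem.Str.startswith (PySem.Str.strip l) "### " = true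
      · simp only [hh, if_true]
        by_cases hp : PySem.Chars.startswith (PySem.Chars.lower (PySem.Chars.strip l.toList)) ['#', '#', '#', ' ', 'p', '0', ' '] = true
        · simp [hp, List.find?, pvA_in_body]
        · rw [pvA_skip_body rest]
          have := ih (pvB_body rest).2.length
            (by subst hn; exact Nat.lt_succ_of_le (pvB_body_len rest)) (pvB_body rest).2 rfl
          simp [hp, this, List.find?]
      · simp only [hh, Bool.false_eq_true, if_false, Bool.not_false, if_true]
        exact ih rest.length (by subst hn; simp) rest rfl

-- ===== VERDICT (by name: the statement is the Claim_ definition above) =====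
theorem parity_p0_state_py_spec : Claim_equal_parity_p0_state_py := by
  intro t _
  unfold Spec_parity_p0_state_py parity_p0_state_py parity_p0_state_py_alt
  exact pvA_eq_sections _
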